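-- pv_equiv track=rewrite | github.com/yfor1008/DataCompress | UnaryCoding/UnaryCoding.py | EUfk
-- ===== SOURCE A (Python) =====
-- def EUfk(n=8, k=3):
--     '''
--     ### Docs: 扩展一元码, k固定, 参考 "Generalized Unary Coding"
--     ### Args:
--         - n: int, 编码需要的位数
--         - k: int, 1的个数
--     ### Returns:
--         - code: dict, 所有数的编码
--     '''
--
--     code = {}
--     total = (n-k)**2 - 1
--     i = 0
--     c = n - k - 1 # 循环次数
--     s = 0 # 间隔s个置为1
--     while i <= total:
--         if i == 0:
--             cd = '0' * n
--             code[i] = cd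
--             i = i + 1
--         else:
--             cd = '0' * (n-k) + '1' * k
--             if s:
--                 # 第一个循环, 没有bit需要置为1
--                 idx = n-(k+s+1)
--                 cd = cd[0:idx] + '1' + cd[idx+1:]
--             code[i] = cd
--             i = i + 1
--             ci = c
--             while ci >= 0:
--                 cd = cd[1:] + cd[0]
--                 code[i] = cd
--                 i = i + 1
--                 ci = ci - 1
--             s = s + 1
--     return code
-- ===== SOURCE B (Python) =====
-- def EUfk(n=8, k=3):
--     '''Flat-index re-implementation: each code is computed directly from its key
--     by block/rotation decomposition instead of a stateful nested while loop.'''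
--     code = {}
--     count = 0 if n == k else (n - k) ** 2
--     per = max(n - k + 1, 1)
--     for i in range(count):
--         if i == 0:
--             code[i] = '0' * n
--         else:
--             block, rot = divmod(i - 1, per)
--             base = '0' * (n - k) + '1' * k
--             if block:
--                 idx = n - k - block - 1
--                 base = base[:idx] + '1' + base[idx + 1:]
--             code[i] = base[rot:] + base[:rot]
--     return code
-- ===== Notes on version B (the rewrite author's own statement) =====
-- stated objective: alternative
-- what changed: Replaced A's stateful nested while loops (a mutating rotating string with i/s/ci counters) by a single flat loop over the key range that computes each code directly from its key via block = (i-1)//per, rot = (i-1)%per index arithmetic and one slicing rotation.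
import Mathlib
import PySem

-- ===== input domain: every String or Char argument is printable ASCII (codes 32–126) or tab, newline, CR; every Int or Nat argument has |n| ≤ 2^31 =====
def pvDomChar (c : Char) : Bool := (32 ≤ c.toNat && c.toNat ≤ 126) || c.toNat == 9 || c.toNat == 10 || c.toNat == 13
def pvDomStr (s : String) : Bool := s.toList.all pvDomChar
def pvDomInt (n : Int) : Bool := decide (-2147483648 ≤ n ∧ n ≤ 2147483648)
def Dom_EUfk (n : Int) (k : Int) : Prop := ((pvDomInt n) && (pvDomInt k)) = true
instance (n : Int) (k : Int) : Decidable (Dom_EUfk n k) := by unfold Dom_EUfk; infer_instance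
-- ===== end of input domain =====

-- B replaces A's stateful nested while loops by a single flat loop that computes each
-- code directly from its key by block/rotation index arithmetic (objective: alternative).

-- ===== PORT A =====

-- cd[1:] + cd[0] : one left rotation.  cd[0] → pyGet?; the `none` arm (Python IndexError)
-- is unreachable in A's runs, since the inner loop only executes with a nonempty cd.
def euRot (cd : List Char) : List Char :=
  PySem.List.slice cd (some 1) none ++
    (match PySem.List.pyGet? cd 0 with
     | some ch => [ch]
     | none => [])

-- the base code word of A's current outer pass: '0'*(n-k) + '1'*k, with the s-dependent
-- '1' patched in at idx = n-(k+s+1) when s != 0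
def euCd (n k s : Int) : List Char :=
  let cd0 := PySem.List.pyRepeat ['0'] (n - k) ++ PySem.List.pyRepeat ['1'] k
  if s ≠ 0 then
    let idx := n - (k + s + 1)
    PySem.List.slice cd0 (some 0) (some idx) ++ ['1'] ++
      PySem.List.slice cd0 (some (idx + 1)) none
  else cd0

-- the inner `while ci >= 0` loop of A; the Nat fuel (ci+1 iterations remain) only makes
-- the loop total, each step re-checks Python's `ci >= 0` condition
def EUfkInnerGo : Nat → PySem.Dict Int String → List Char → Int → Int →
    PySem.Dict Int String × List Char × Int
  | 0, code, cd, i, _ => (code, cd, i)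
  | fuel + 1, code, cd, i, ci =>
    if 0 ≤ ci then
      let cd' := euRot cd
      EUfkInnerGo fuel (code.insert i (String.ofList cd')) cd' (i + 1) (ci - 1)
    else (code, cd, i)

def EUfkInner (code : PySem.Dict Int String) (cd : List Char) (i ci : Int) :
    PySem.Dict Int String × List Char × Int :=
  EUfkInnerGo (ci + 1).toNat code cd i ci

-- the outer `while i <= total` loop of A; fuel total+1-i bounds the remaining
-- iterations (i strictly increases each pass), the loop condition is re-checked each step
def EUfkOuterGo : Nat → Int → Int → Int → Int → PySem.Dict Int String → Int → Int →
    PySem.Dict Int String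
  | 0, _, _, _, _, code, _, _ => code
  | fuel + 1, n, k, total, c, code, i, s =>
    if i ≤ total then
      if i = 0 then
        EUfkOuterGo fuel n k total c
          (code.insert i (String.ofList (PySem.List.pyRepeat ['0'] n))) (i + 1) s
      else
        let cd := euCd n k s
        let r := EUfkInner (code.insert i (String.ofList cd)) cd (i + 1) c
        EUfkOuterGo fuel n k total c r.1 r.2.2 (s + 1)
    else code

def EUfk (n : Int) (k : Int) : List (Int × String) :=
  (EUfkOuterGo ((n - k) ^ 2 - 1 + 1 - 0).toNat n k ((n - k) ^ 2 - 1) (n - k - 1)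
    PySem.Dict.empty 0 0).items

-- ===== PORT B =====

-- Source B's else-branch: compute code i directly from block = (i-1)//per, rot = (i-1)%per
def euBVal (n k per i : Int) : List Char :=
  let block := PySem.Int.floordiv (i - 1) per
  let rot := PySem.Int.mod (i - 1) per
  let base0 := PySem.List.pyRepeat ['0'] (n - k) ++ PySem.List.pyRepeat ['1'] k
  let base :=
    if block ≠ 0 then
      let idx := n - k - block - 1
      PySem.List.slice base0 none (some idx) ++ ['1'] ++
        PySem.List.slice base0 (some (idx + 1)) none
    else base0
  PySem.List.slice base (some rot) none ++ PySem.List.slice base none (some rot)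

def EUfk_alt (n : Int) (k : Int) : List (Int × String) :=
  let count : Int := if n = k then 0 else (n - k) ^ 2
  let per : Int := max (n - k + 1) 1
  ((PySem.List.pyRange 0 count 1).foldl
    (fun code i =>
      if i = 0 then code.insert i (String.ofList (PySem.List.pyRepeat ['0'] n))
      else code.insert i (String.ofList (euBVal n k per i)))
    PySem.Dict.empty).items

-- ===== PRECONDITION & SPEC =====
def Spec_EUfk (n : Int) (k : Int) (out : List (Int × String)) : Prop := out = EUfk_alt n k
instance (n : Int) (k : Int) (out : List (Int × String)) : Decidable (Spec_EUfk n k out) := by unfold Spec_EUfk; infer_instance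

-- ===== CLAIM (what is proved, stated in full; the proofs are below) =====
def Claim_equal_EUfk : Prop := ∀ (n : Int) (k : Int), Dom_EUfk n k → Spec_EUfk n k (EUfk n k)

-- ===== LEMMAS AND PROOFS =====

-- the per-key value both programs assign to key i
def euV (n k : Int) (i : Int) : String :=
  if i = 0 then String.ofList (PySem.List.pyRepeat ['0'] n)
  else String.ofList (euBVal n k (max (n - k + 1) 1) i)

-- B's dict is the flat map of euV over the key range
theorem EUfk_alt_eq_map (n k : Int) :
    EUfk_alt n k =
      (PySem.List.pyRange 0 (if n = k then 0 else (n - k) ^ 2) 1).map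
        (fun i => (i, euV n k i)) := by
  show ((PySem.List.pyRange 0 _ 1).foldl _ PySem.Dict.empty).items = _
  have hbody : (fun (code : PySem.Dict Int String) (i : Int) =>
      if i = 0 then code.insert i (String.ofList (PySem.List.pyRepeat ['0'] n))
      else code.insert i (String.ofList (euBVal n k (max (n - k + 1) 1) i)))
      = fun code i => code.insert i (euV n k i) := by
    funext code i
    by_cases h : i = 0 <;> simp [h, euV]
  rw [hbody,
    PySem.Dict.items_foldl_insert_fresh _ (fun i => i) (euV n k) PySem.Dict.empty
      (by intro a _; simp [PySem.Dict.contains, PySem.Dict.empty])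
      (by simpa using PySem.List.nodup_pyRange_one 0 _)]
  simp [PySem.Dict.empty]

theorem eu_contains_false (code : PySem.Dict Int String) (i : Int)
    (h : ∀ p ∈ code.items, p.1 < i) : code.contains i = false := by
  simp only [PySem.Dict.contains, List.any_eq_false, beq_iff_eq]
  intro p hp
  exact (h p hp).ne

theorem EUfkInnerGo_step (fuel : Nat) (code : PySem.Dict Int String) (cd : List Char)
    (i ci : Int) :
    EUfkInnerGo (fuel + 1) code cd i ci =
      if 0 ≤ ci then
        EUfkInnerGo fuel (code.insert i (String.ofList (euRot cd))) (euRot cd) (i + 1) (ci - 1)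
      else (code, cd, i) := rfl

theorem EUfkInner_spec (t : Nat) : ∀ (code : PySem.Dict Int String) (cd : List Char) (i : Int),
    (∀ p ∈ code.items, p.1 < i) →
    (EUfkInner code cd i (t : Int)).1.items =
        code.items ++
          (List.range (t + 1)).map
            (fun (u : Nat) => ((i + (u : Int), String.ofList (euRot^[u + 1] cd)) : Int × String)) ∧
      (EUfkInner code cd i (t : Int)).2.2 = i + t + 1 := by
  induction t with
  | zero =>
      intro code cd i hk
      unfold EUfkInner
      have h1 : (((0 : Nat) : Int) + 1).toNat = 0 + 1 := by simp
      rw [h1, EUfkInnerGo_step, if_pos (by simp)]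
      simp [EUfkInnerGo,
        PySem.Dict.items_insert_of_not_contains code _ (eu_contains_false code i hk)]
  | succ t ih =>
      intro code cd i hk
      unfold EUfkInner
      have h1 : (((t + 1 : Nat) : Int) + 1).toNat = (t + 1) + 1 := by omega
      rw [h1, EUfkInnerGo_step, if_pos (by positivity)]
      have hcast : ((t + 1 : Nat) : Int) - 1 = (t : Int) := by push_cast; ring
      rw [hcast]
      have hE : ∀ (code' : PySem.Dict Int String) (cd' : List Char) (i' : Int),
          EUfkInnerGo (t + 1) code' cd' i' (t : Int) = EUfkInner code' cd' i' (t : Int) := by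
        intro code' cd' i'
        unfold EUfkInner
        have hT : (((t : Nat) : Int) + 1).toNat = t + 1 := by omega
        rw [hT]
      rw [hE]
      have hk' : ∀ p ∈ (code.insert i (String.ofList (euRot cd))).items, p.1 < i + 1 := by
        intro p hp
        rw [PySem.Dict.items_insert_of_not_contains code _ (eu_contains_false code i hk)] at hp
        rcases List.mem_append.1 hp with h | h
        · have := hk p h; omega
        · rcases List.mem_singleton.1 h with rfl
          norm_num
      obtain ⟨h1, h2⟩ := ih (code.insert i (String.ofList (euRot cd))) (euRot cd) (i + 1) hk'
      refine ⟨?_, by rw [h2]; push_cast; ring⟩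
      rw [h1, PySem.Dict.items_insert_of_not_contains code _ (eu_contains_false code i hk),
        List.append_assoc]
      congr 1
      have hsplit : (List.range (t + 1 + 1)).map
            (fun (u : Nat) => ((i + (u : Int), String.ofList (euRot^[u + 1] cd)) : Int × String))
          = ((i + ((0 : Nat) : Int), String.ofList (euRot^[0 + 1] cd)) : Int × String) ::
            (List.range (t + 1)).map
              ((fun (u : Nat) => ((i + (u : Int), String.ofList (euRot^[u + 1] cd)) : Int × String)) ∘ Nat.succ) := by
        rw [List.range_succ_eq_map, List.map_cons, List.map_map]
      rw [hsplit, List.singleton_append]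
      congr 1
      · simp
      · apply List.map_congr_left
        intro u _
        simp only [Function.comp_apply]
        rw [← Function.iterate_succ_apply euRot (u + 1) cd]
        congr 1
        · push_cast; ring

theorem euRot_eq_rotate (l : List Char) (hl : l ≠ []) : euRot l = l.rotate 1 := by
  obtain ⟨x, xs, rfl⟩ := List.exists_cons_of_ne_nil hl
  simp [euRot, PySem.List.slice_from_one, List.rotate_cons_succ]

theorem euRot_iter_eq_rotate (l : List Char) (hl : l ≠ []) (u : Nat) :
    euRot^[u] l = l.rotate u := by
  induction u with
  | zero => simp
  | succ u ih =>
      have hne : l.rotate u ≠ [] := fun hh => hl (List.rotate_eq_nil_iff.1 hh)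
      rw [Function.iterate_succ_apply', ih, euRot_eq_rotate _ hne, List.rotate_rotate]

theorem euCd_length (n k s : Int) (hm : 1 ≤ n - k) (hs : 0 ≤ s) (hs2 : s ≤ n - k - 2) :
    (euCd n k s).length = (n - k).toNat + k.toNat := by
  have hL : (PySem.List.pyRepeat ['0'] (n - k) ++ PySem.List.pyRepeat ['1'] k).length
      = (n - k).toNat + k.toNat := by
    simp [PySem.List.pyRepeat_singleton]
  by_cases h : s = 0
  · simp [euCd, h]
  · simp only [euCd]
    rw [if_pos h]
    rw [PySem.List.slice_zero_start, PySem.List.slice_to _ (by omega),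
      PySem.List.slice_from _ (by omega)]
    simp only [List.length_append, List.length_take, List.length_drop, hL,
      List.length_cons, List.length_nil]
    omega

-- B's rotation by slicing is List.rotate
theorem eu_slice_rot (l : List Char) (u : Nat) (hlen : u ≤ l.length) :
    PySem.List.slice l (some (u : Int)) none ++ PySem.List.slice l none (some (u : Int)) =
      l.rotate u := by
  rw [PySem.List.slice_from _ (Int.natCast_nonneg u), PySem.List.slice_to _ (Int.natCast_nonneg u),
    List.rotate_eq_drop_append_take (by simpa)]
  simp

-- block/rotation arithmetic: the code at key 1 + s*(m+1) + u is the u-fold rotation of euCd n k s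
theorem euV_block (n k s : Int) (u : Nat) (hm : 1 ≤ n - k) (hs : 0 ≤ s)
    (hs2 : s ≤ n - k - 2) (hu : (u : Int) ≤ n - k) :
    euV n k (1 + s * (n - k + 1) + u) = String.ofList ((euCd n k s).rotate u) := by
  have hprod : 0 ≤ s * (n - k + 1) := mul_nonneg hs (by omega)
  have hu0 : (0 : Int) ≤ (u : Int) := Int.natCast_nonneg u
  unfold euV
  rw [if_neg (by intro h; linarith)]
  congr 1
  have hper : (max (n - k + 1) 1) = n - k + 1 := max_eq_left (by omega)
  simp only [euBVal, hper]
  have harg : 1 + s * (n - k + 1) + (u : Int) - 1 = s * (n - k + 1) + u := by ring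
  rw [harg]
  have hfd : PySem.Int.floordiv (s * (n - k + 1) + u) (n - k + 1) = s := by
    rw [PySem.Int.floordiv_eq_iff_of_pos (by omega)]
    have hexp : (s + 1) * (n - k + 1) = s * (n - k + 1) + (n - k + 1) := by ring
    constructor
    · linarith
    · rw [hexp]; linarith
  have hmod : PySem.Int.mod (s * (n - k + 1) + u) (n - k + 1) = u := by
    have h2 := PySem.Int.floordiv_mul_add_mod (s * (n - k + 1) + u) (n - k + 1)
    rw [hfd] at h2; linarith
  rw [hfd, hmod]
  by_cases hs0 : s = 0
  · rw [if_neg (by simp [hs0])]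
    have hcd : euCd n k s = PySem.List.pyRepeat ['0'] (n - k) ++ PySem.List.pyRepeat ['1'] k := by
      simp [euCd, hs0]
    rw [hcd]
    exact eu_slice_rot _ u (by simp [PySem.List.pyRepeat_singleton]; omega)
  · rw [if_pos hs0]
    have hcd : euCd n k s =
        PySem.List.slice (PySem.List.pyRepeat ['0'] (n - k) ++ PySem.List.pyRepeat ['1'] k)
            none (some (n - k - s - 1)) ++ ['1'] ++
          PySem.List.slice (PySem.List.pyRepeat ['0'] (n - k) ++ PySem.List.pyRepeat ['1'] k)
            (some (n - k - s - 1 + 1)) none := by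
      simp only [euCd]
      rw [if_pos hs0]
      have : n - (k + s + 1) = n - k - s - 1 := by ring
      rw [this, PySem.List.slice_zero_start]
    rw [← hcd]
    exact eu_slice_rot _ u (by rw [euCd_length n k s hm hs hs2]; omega)

-- one outer pass of A, as a list chunk, equals B's map over its key range
theorem eu_chunk (n k s i : Int) (hm : 1 ≤ n - k) (hs : 0 ≤ s) (hs2 : s ≤ n - k - 2)
    (hi : i = 1 + s * (n - k + 1)) :
    ((i, String.ofList (euCd n k s)) : Int × String) ::
        (List.range ((n - k - 1).toNat + 1)).map
          (fun (u : Nat) =>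
            ((i + 1 + (u : Int), String.ofList (euRot^[u + 1] (euCd n k s))) : Int × String)) =
      (PySem.List.pyRange i (i + (n - k) + 1) 1).map (fun j => (j, euV n k j)) := by
  have hlen := euCd_length n k s hm hs hs2
  have hcdne : euCd n k s ≠ [] := by
    intro hnil
    rw [hnil] at hlen
    simp at hlen
    omega
  rw [PySem.List.pyRange_one]
  have hcount : (i + (n - k) + 1 - i).toNat = (n - k - 1).toNat + 1 + 1 := by omega
  rw [hcount, List.map_map]
  conv_rhs => rw [List.range_succ_eq_map]
  rw [List.map_cons, List.map_map]
  congr 1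
  · have h0 := euV_block n k s 0 hm hs hs2 (by omega)
    simp only [Nat.cast_zero, add_zero] at h0
    rw [← hi] at h0
    simp [h0]
  · apply List.map_congr_left
    intro u hu
    rw [List.mem_range] at hu
    simp only [Function.comp_apply]
    have hub : ((u + 1 : Nat) : Int) ≤ n - k := by omega
    have hv := euV_block n k s (u + 1) hm hs hs2 hub
    have hkey : i + ((u + 1 : Nat) : Int) = 1 + s * (n - k + 1) + ((u + 1 : Nat) : Int) := by
      rw [hi]
    rw [hkey, hv, euRot_iter_eq_rotate (euCd n k s) hcdne (u + 1)]
    have hfst : i + 1 + (u : Int) = 1 + s * (n - k + 1) + ((u + 1 : Nat) : Int) := by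
      rw [hi]; push_cast; ring
    rw [hfst]

-- the outer loop in the case n - k ≥ 1
theorem EUfkOuter_pos (n k : Int) (hm : 1 ≤ n - k) : ∀ (N : Nat) (s i : Int)
    (code : PySem.Dict Int String), i = 1 + s * (n - k + 1) → 0 ≤ s →
    ((n - k) ^ 2 - i).toNat ≤ N → (∀ p ∈ code.items, p.1 < i) →
    (EUfkOuterGo N n k ((n - k) ^ 2 - 1) (n - k - 1) code i s).items =
      code.items ++ (PySem.List.pyRange i ((n - k) ^ 2) 1).map (fun j => (j, euV n k j)) := by
  intro N
  induction N with
  | zero =>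
      intro s i code hi hs hN hk
      simp only [EUfkOuterGo]
      rw [PySem.List.pyRange_one_eq_nil (by omega)]
      simp
  | succ N ih =>
      intro s i code hi hs hN hk
      by_cases hle : i ≤ (n - k) ^ 2 - 1
      swap
      · simp only [EUfkOuterGo]
        rw [if_neg hle]
        rw [PySem.List.pyRange_one_eq_nil (by omega)]
        simp
      have hprod : 0 ≤ s * (n - k + 1) := mul_nonneg hs (by omega)
      have hi1 : 1 ≤ i := by rw [hi]; linarith
      have hs2 : s ≤ n - k - 2 := by
        by_contra hcon
        push_neg at hcon
        have h1 : (n - k - 1) * (n - k + 1) ≤ s * (n - k + 1) :=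
          mul_le_mul_of_nonneg_right (by omega) (by omega)
        have h2 : (n - k - 1) * (n - k + 1) = (n - k) ^ 2 - 1 := by ring
        linarith
      have hsucc : s * (n - k + 1) + (n - k + 1) ≤ (n - k - 1) * (n - k + 1) := by
        have := mul_le_mul_of_nonneg_right (show s + 1 ≤ n - k - 1 by omega)
          (show (0 : Int) ≤ n - k + 1 by omega)
        linarith [this, (by ring : (s + 1) * (n - k + 1) = s * (n - k + 1) + (n - k + 1))]
      have hupper : i + (n - k) + 1 ≤ (n - k) ^ 2 := by
        have h2 : (n - k - 1) * (n - k + 1) = (n - k) ^ 2 - 1 := by ring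
        rw [hi]; linarith
      simp only [EUfkOuterGo]
      rw [if_pos hle, if_neg (by omega)]
      have hlen := euCd_length n k s hm hs hs2
      have hcdne : euCd n k s ≠ [] := by
        intro hnil
        rw [hnil] at hlen
        simp at hlen
        omega
      have hk1 : ∀ p ∈ (code.insert i (String.ofList (euCd n k s))).items, p.1 < i + 1 := by
        intro p hp
        rw [PySem.Dict.items_insert_of_not_contains code _ (eu_contains_false code i hk)] at hp
        rcases List.mem_append.1 hp with h | h
        · have := hk p h; omega
        · rcases List.mem_singleton.1 h with rfl; norm_num
      obtain ⟨hitems, hi'⟩ :=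
        EUfkInner_spec (n - k - 1).toNat (code.insert i (String.ofList (euCd n k s)))
          (euCd n k s) (i + 1) hk1
      have htc : (((n - k - 1).toNat : Nat) : Int) = n - k - 1 := by omega
      rw [htc] at hitems hi'
      have hi'' : (EUfkInner (code.insert i (String.ofList (euCd n k s))) (euCd n k s) (i + 1)
          (n - k - 1)).2.2 = i + (n - k) + 1 := by rw [hi']; ring
      rw [hi'']
      have hkeys' : ∀ p ∈ (EUfkInner (code.insert i (String.ofList (euCd n k s))) (euCd n k s)
          (i + 1) (n - k - 1)).1.items, p.1 < i + (n - k) + 1 := by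
        intro p hp
        rw [hitems] at hp
        rcases List.mem_append.1 hp with h | h
        · have := hk1 p h; omega
        · obtain ⟨u, hu, rfl⟩ := List.mem_map.1 h
          rw [List.mem_range] at hu
          simp only []
          have : (u : Int) ≤ n - k - 1 := by omega
          omega
      rw [ih (s + 1) (i + (n - k) + 1) _ (by rw [hi]; ring) (by omega)
        (by
          rw [Int.toNat_le] at hN ⊢
          push_cast at hN ⊢
          linarith) hkeys']
      rw [hitems, PySem.Dict.items_insert_of_not_contains code _ (eu_contains_false code i hk)]
      rw [PySem.List.pyRange_one_append i (i + (n - k) + 1) ((n - k) ^ 2) (by omega) hupper]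
      rw [List.map_append, ← eu_chunk n k s i hm hs hs2 hi]
      simp [List.append_assoc]

-- for n - k ≤ -1 each key's code is just euCd at s = i - 1 (per = 1, so rot = 0)
theorem euV_neg (n k i : Int) (hm : n - k ≤ -1) (hi : 1 ≤ i) :
    euV n k i = String.ofList (euCd n k (i - 1)) := by
  unfold euV
  rw [if_neg (by omega)]
  congr 1
  have hper : max (n - k + 1) 1 = 1 := max_eq_right (by omega)
  simp only [euBVal, hper]
  have hfd : PySem.Int.floordiv (i - 1) 1 = i - 1 := by
    rw [PySem.Int.floordiv_eq_ediv_of_pos (by omega)]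
    exact Int.ediv_one _
  have hmod : PySem.Int.mod (i - 1) 1 = 0 := by
    have h2 := PySem.Int.floordiv_mul_add_mod (i - 1) 1
    rw [hfd] at h2
    omega
  rw [hfd, hmod]
  rw [PySem.List.slice_from _ le_rfl, PySem.List.slice_to _ le_rfl]
  simp only [Int.toNat_zero, List.drop_zero, List.take_zero, List.append_nil]
  simp only [euCd]
  by_cases h1 : i - 1 = 0
  · rw [if_neg (by simp [h1]), if_neg (by simp [h1])]
  · rw [if_pos h1, if_pos h1]
    have hidx : n - (k + (i - 1) + 1) = n - k - (i - 1) - 1 := by ring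
    rw [hidx, PySem.List.slice_zero_start]

-- the outer loop in the case n - k ≤ -1 (the inner loop never runs)
theorem EUfkOuter_neg (n k : Int) (hm : n - k ≤ -1) : ∀ (N : Nat) (i s : Int)
    (code : PySem.Dict Int String), 1 ≤ i → s = i - 1 →
    ((n - k) ^ 2 - i).toNat ≤ N → (∀ p ∈ code.items, p.1 < i) →
    (EUfkOuterGo N n k ((n - k) ^ 2 - 1) (n - k - 1) code i s).items =
      code.items ++ (PySem.List.pyRange i ((n - k) ^ 2) 1).map (fun j => (j, euV n k j)) := by
  intro N
  induction N with
  | zero =>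
      intro i s code hi1 hsv hN hk
      simp only [EUfkOuterGo]
      rw [PySem.List.pyRange_one_eq_nil (by omega)]
      simp
  | succ N ih =>
      intro i s code hi1 hsv hN hk
      by_cases hle : i ≤ (n - k) ^ 2 - 1
      swap
      · simp only [EUfkOuterGo]
        rw [if_neg hle]
        rw [PySem.List.pyRange_one_eq_nil (by linarith [not_le.1 hle])]
        simp
      simp only [EUfkOuterGo]
      rw [if_pos hle, if_neg (by omega)]
      have hIn : EUfkInner (code.insert i (String.ofList (euCd n k s))) (euCd n k s) (i + 1)
          (n - k - 1) = (code.insert i (String.ofList (euCd n k s)), euCd n k s, i + 1) := by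
        unfold EUfkInner
        have h0 : (n - k - 1 + 1).toNat = 0 := by omega
        rw [h0]
        rfl
      rw [hIn]
      dsimp only
      have hk1 : ∀ p ∈ (code.insert i (String.ofList (euCd n k s))).items, p.1 < i + 1 := by
        intro p hp
        rw [PySem.Dict.items_insert_of_not_contains code _ (eu_contains_false code i hk)] at hp
        rcases List.mem_append.1 hp with h | h
        · have := hk p h; omega
        · rcases List.mem_singleton.1 h with rfl; norm_num
      rw [ih (i + 1) (s + 1) _ (by omega) (by omega)
        (by
          rw [Int.toNat_le] at hN ⊢
          push_cast at hN ⊢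
          linarith) hk1]
      rw [PySem.Dict.items_insert_of_not_contains code _ (eu_contains_false code i hk)]
      rw [PySem.List.pyRange_one_cons (by linarith : i < (n - k) ^ 2), List.map_cons]
      rw [euV_neg n k i hm hi1, hsv]
      simp [List.append_assoc]

-- A's dict is the same flat map
theorem EUfk_eq_map (n k : Int) :
    EUfk n k =
      (PySem.List.pyRange 0 (if n = k then 0 else (n - k) ^ 2) 1).map
        (fun i => (i, euV n k i)) := by
  unfold EUfk
  by_cases hnk : n = k
  · subst hnk
    rw [if_pos rfl]
    have hf : ((n - n) ^ 2 - 1 + 1 - 0).toNat = 0 := by norm_num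
    rw [hf]
    simp [EUfkOuterGo, PySem.Dict.empty, PySem.List.pyRange_one_eq_nil]
  · rw [if_neg hnk]
    have hne : n - k ≠ 0 := sub_ne_zero.mpr hnk
    have hsq : 1 ≤ (n - k) ^ 2 := by
      rcases Ne.lt_or_gt hne with h | h
      · nlinarith
      · nlinarith
    have hf : ((n - k) ^ 2 - 1 + 1 - 0).toNat = ((n - k) ^ 2 - 1).toNat + 1 := by omega
    rw [hf]
    simp only [EUfkOuterGo]
    rw [if_pos (by omega : (0 : Int) ≤ (n - k) ^ 2 - 1)]
    simp only [if_true]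
    have hkeys : ∀ p ∈ (PySem.Dict.empty.insert (0 : Int)
        (String.ofList (PySem.List.pyRepeat ['0'] n))).items, p.1 < 0 + 1 := by
      intro p hp
      rw [PySem.Dict.items_insert_of_not_contains _ _
        (by simp [PySem.Dict.contains, PySem.Dict.empty])] at hp
      simp [PySem.Dict.empty] at hp
      rcases hp with ⟨h1, _⟩
      omega
    have hhead : (PySem.Dict.empty.insert (0 : Int)
        (String.ofList (PySem.List.pyRepeat ['0'] n))).items =
        [((0 : Int), euV n k 0)] := by
      rw [PySem.Dict.items_insert_of_not_contains _ _
        (by simp [PySem.Dict.contains, PySem.Dict.empty])]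
      simp [PySem.Dict.empty, euV]
    rcases Int.lt_or_le (n - k) 0 with hneg | hpos
    · have H := EUfkOuter_neg n k (by omega) ((n - k) ^ 2 - 1).toNat (0 + 1) 0
        (PySem.Dict.empty.insert (0 : Int) (String.ofList (PySem.List.pyRepeat ['0'] n)))
        (by norm_num) (by norm_num) (by omega) hkeys
      rw [H]
      rw [hhead, PySem.List.pyRange_one_cons (by linarith : (0 : Int) < (n - k) ^ 2),
        List.map_cons]
      norm_num
    · have hm : 1 ≤ n - k := by omega
      have H := EUfkOuter_pos n k hm ((n - k) ^ 2 - 1).toNat 0 (0 + 1)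
        (PySem.Dict.empty.insert (0 : Int) (String.ofList (PySem.List.pyRepeat ['0'] n)))
        (by ring) le_rfl (by omega) hkeys
      rw [H]
      rw [hhead, PySem.List.pyRange_one_cons (by linarith : (0 : Int) < (n - k) ^ 2),
        List.map_cons]
      norm_num

-- ===== VERDICT (by name: the statement is the Claim_ definition above) =====
theorem EUfk_spec : Claim_equal_EUfk := by
  intro n k _
  unfold Spec_EUfk
  rw [EUfk_alt_eq_map, EUfk_eq_map]
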